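-- pv_equiv track=rewrite | github.com/hsulab-arc/BridgeRNA2024 | bridgerna2024/structure.py | extract_aln_range
-- ===== SOURCE A (Python) =====
-- def extract_aln_range(aln, unalign_seq_len):
--     start = -1
--     end = -1
--     unalign_count = 0
--     for i, c in enumerate(aln):
--         if c != '-' and start == -1:
--             start = i
--             unalign_count += 1
--         elif c != '-' and unalign_count == unalign_seq_len - 1:
--             end = i + 1
--             break
--         elif c != '-':
--             unalign_count += 1
--     return start, end
-- ===== SOURCE B (Python) =====
-- def extract_aln_range(aln, unalign_seq_len):
--     idx = [i for i, c in enumerate(aln) if c != '-']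
--     start = idx[0] if idx else -1
--     end = idx[unalign_seq_len - 1] + 1 if 1 < unalign_seq_len <= len(idx) else -1
--     return start, end
-- ===== Notes on version B (the rewrite author's own statement) =====
-- stated objective: simpler
-- what changed: Replaces A's stateful loop with break (start/end/count state machine) by collecting the non-gap positions once and reading start and end off that list with a closed-form guard.
import Mathlib
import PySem

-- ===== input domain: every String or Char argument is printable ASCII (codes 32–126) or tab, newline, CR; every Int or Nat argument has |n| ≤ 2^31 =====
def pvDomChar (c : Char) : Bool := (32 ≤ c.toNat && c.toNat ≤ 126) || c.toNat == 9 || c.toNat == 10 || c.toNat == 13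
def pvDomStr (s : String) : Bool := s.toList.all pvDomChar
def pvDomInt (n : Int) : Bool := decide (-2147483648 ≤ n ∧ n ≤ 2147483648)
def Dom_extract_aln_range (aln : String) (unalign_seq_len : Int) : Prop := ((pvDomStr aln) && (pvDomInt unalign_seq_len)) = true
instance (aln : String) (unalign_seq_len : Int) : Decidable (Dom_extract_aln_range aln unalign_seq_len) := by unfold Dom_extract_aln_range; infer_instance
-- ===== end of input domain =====

-- B replaces A's stateful scan-with-break by collecting the non-gap positions once
-- and reading start/end off that list (objective: simpler; same cost).

-- ===== PORT A =====
-- the for-loop of A: state (start, end, unalign_count); 'break' = immediate return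
def pvLoopA (usl : Int) : List (Int × Char) → Int → Int → Int → Int × Int
  | [], start, end_, _ => (start, end_)
  | (i, c) :: rest, start, end_, cnt =>
    if c ≠ '-' ∧ start = -1 then pvLoopA usl rest i end_ (cnt + 1)
    else if c ≠ '-' ∧ cnt = usl - 1 then (start, i + 1)
    else if c ≠ '-' then pvLoopA usl rest start end_ (cnt + 1)
    else pvLoopA usl rest start end_ cnt

def extract_aln_range (aln : String) (unalign_seq_len : Int) : Int × Int :=
  pvLoopA unalign_seq_len (PySem.List.enumerate aln.toList) (-1) (-1) 0

-- ===== PORT B =====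
def extract_aln_range_alt (aln : String) (unalign_seq_len : Int) : Int × Int :=
  let idx := ((PySem.List.enumerate aln.toList).filter (fun p => p.2 ≠ '-')).map (fun p => p.1)
  let start := match idx with | [] => -1 | x :: _ => x
  -- idx[unalign_seq_len - 1] is taken only under the guard, where it is in range (getD never defaults)
  let stop := if 1 < unalign_seq_len ∧ unalign_seq_len ≤ (idx.length : Int)
              then idx.getD (unalign_seq_len - 1).toNat 0 + 1 else -1
  (start, stop)

-- ===== PRECONDITION & SPEC =====
def Spec_extract_aln_range (aln : String) (unalign_seq_len : Int) (out : Int × Int) : Prop := out = extract_aln_range_alt aln unalign_seq_len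
instance (aln : String) (unalign_seq_len : Int) (out : Int × Int) : Decidable (Spec_extract_aln_range aln unalign_seq_len out) := by unfold Spec_extract_aln_range; infer_instance

-- ===== CLAIM (what is proved, stated in full; the proofs are below) =====
def Claim_equal_extract_aln_range : Prop := ∀ (aln : String) (unalign_seq_len : Int), Dom_extract_aln_range aln unalign_seq_len → Spec_extract_aln_range aln unalign_seq_len (extract_aln_range aln unalign_seq_len)

-- ===== LEMMAS AND PROOFS =====
-- the non-gap positions of an enumerated suffix
def pvIdx (l : List (Int × Char)) : List Int :=
  (l.filter (fun p => p.2 ≠ '-')).map (fun p => p.1)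

-- after 'start' has been set (start ≠ -1, end still -1), the loop returns start unchanged and
-- breaks at the (usl-1-cnt)-th remaining non-gap position, if any
lemma pvLoopA_post (usl : Int) : ∀ (l : List (Int × Char)) (start cnt : Int), start ≠ -1 →
    pvLoopA usl l start (-1) cnt =
      (start, if cnt ≤ usl - 1 ∧ usl - 1 - cnt < ((pvIdx l).length : Int)
              then (pvIdx l).getD (usl - 1 - cnt).toNat 0 + 1 else -1) := by
  intro l
  induction l with
  | nil =>
    intro start cnt h
    simp only [pvLoopA, pvIdx, List.filter_nil, List.map_nil, List.length_nil]
    rw [if_neg]; omega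
  | cons p rest ih =>
    intro start cnt h
    obtain ⟨i, c⟩ := p
    by_cases hc : c = '-'
    · simp only [pvLoopA, hc, pvIdx, List.filter_cons, ne_eq, not_true_eq_false,
        decide_false, if_neg (by simp : ¬('-' ≠ '-' ∧ start = -1)),
        if_neg (by simp : ¬('-' ≠ '-' ∧ cnt = usl - 1)), if_neg (by simp : ¬('-' ≠ '-'))]
      simpa [pvIdx] using ih start cnt h
    · have hidx : pvIdx ((i, c) :: rest) = i :: pvIdx rest := by
        simp [pvIdx, List.filter_cons, hc]
      by_cases hcnt : cnt = usl - 1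
      · simp only [pvLoopA, if_neg (by tauto : ¬(c ≠ '-' ∧ start = -1)),
          if_pos (⟨hc, hcnt⟩ : c ≠ '-' ∧ cnt = usl - 1), hidx]
        rw [if_pos (by simp; omega)]
        simp [hcnt]
      · simp only [pvLoopA, if_neg (by tauto : ¬(c ≠ '-' ∧ start = -1)),
          if_neg (by tauto : ¬(c ≠ '-' ∧ cnt = usl - 1)), if_pos hc, hidx]
        rw [ih start (cnt + 1) h]
        congr 1
        by_cases hcond : cnt + 1 ≤ usl - 1 ∧ usl - 1 - (cnt + 1) < ((pvIdx rest).length : Int)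
        · rw [if_pos hcond, if_pos (by simp; omega)]
          have ht : (usl - 1 - cnt).toNat = (usl - 1 - (cnt + 1)).toNat + 1 := by omega
          rw [ht, List.getD_cons_succ]
        · rw [if_neg hcond, if_neg (by simp; omega)]

-- the initial phase: start still -1; all indices in l are ≥ 0 (so a set start is never -1)
lemma pvLoopA_init (usl : Int) : ∀ (l : List (Int × Char)), (∀ p ∈ l, 0 ≤ p.1) →
    pvLoopA usl l (-1) (-1) 0 =
      match pvIdx l with
      | [] => (-1, -1)
      | i :: t => (i, if 1 ≤ usl - 1 ∧ usl - 2 < (t.length : Int)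
                      then t.getD (usl - 2).toNat 0 + 1 else -1) := by
  intro l
  induction l with
  | nil => intro _; simp [pvLoopA, pvIdx]
  | cons p rest ih =>
    intro hpos
    obtain ⟨i, c⟩ := p
    by_cases hc : c = '-'
    · have : pvIdx ((i, c) :: rest) = pvIdx rest := by simp [pvIdx, hc]
      rw [this, ← ih (fun q hq => hpos q (List.mem_cons_of_mem _ hq))]
      simp [pvLoopA, hc]
    · have hi : (0 : Int) ≤ i := hpos (i, c) (List.mem_cons_self)
      have hidx : pvIdx ((i, c) :: rest) = i :: pvIdx rest := by
        simp [pvIdx, List.filter_cons, hc]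
      rw [hidx]
      have hstep : pvLoopA usl ((i, c) :: rest) (-1) (-1) 0 = pvLoopA usl rest i (-1) 1 := by
        simp [pvLoopA, hc]
      rw [hstep, pvLoopA_post usl rest i 1 (by omega)]
      have : usl - 1 - 1 = usl - 2 := by omega
      simp [this]

lemma enumerate_fst_nonneg (xs : List Char) : ∀ p ∈ PySem.List.enumerate xs 0, 0 ≤ p.1 := by
  intro p hp
  rw [PySem.List.mem_enumerate_iff] at hp
  obtain ⟨k, hk, rfl⟩ := hp
  simp

-- ===== VERDICT (by name: the statement is the Claim_ definition above) =====
theorem extract_aln_range_spec : Claim_equal_extract_aln_range := by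
  intro aln usl _
  unfold Spec_extract_aln_range extract_aln_range extract_aln_range_alt
  rw [pvLoopA_init usl _ (enumerate_fst_nonneg aln.toList)]
  show _ = (match pvIdx (PySem.List.enumerate aln.toList 0) with
            | [] => (-1 : Int) | x :: _ => x,
            if 1 < usl ∧ usl ≤ ((pvIdx (PySem.List.enumerate aln.toList 0)).length : Int)
            then (pvIdx (PySem.List.enumerate aln.toList 0)).getD (usl - 1).toNat 0 + 1 else -1)
  cases hidx : pvIdx (PySem.List.enumerate aln.toList 0) with
  | nil => simp; omega
  | cons i t =>
    simp only
    congr 1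
    by_cases hcond : 1 ≤ usl - 1 ∧ usl - 2 < (t.length : Int)
    · rw [if_pos hcond, if_pos (by simp; omega)]
      have ht : (usl - 1).toNat = (usl - 2).toNat + 1 := by omega
      rw [ht, List.getD_cons_succ]
    · rw [if_neg hcond, if_neg (by simp; omega)]
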